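-- pv_equiv track=rewrite | github.com/AlishbaTariq-atk/Dual_Brain_Psychotherapy_Bot | eye_tracking.py | track_gaze_duration
-- ===== SOURCE A (Python) =====
-- def track_gaze_duration(current_gaze, gaze_history, max_duration=30):
--     """Track how long someone has been looking in a specific direction"""
--     gaze_history.append(current_gaze)
--     if len(gaze_history) > max_duration:
--         gaze_history.pop(0)
--
--     # Count consecutive frames of looking away
--     away_count = 0
--     for gaze in reversed(gaze_history):
--         if gaze in ["Left", "Right"]:
--             away_count += 1
--         else:
--             break
--
--     return away_count, len(gaze_history)
-- ===== SOURCE B (Python) =====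
-- def track_gaze_duration(current_gaze, gaze_history, max_duration=30):
--     """Track how long someone has been looking in a specific direction"""
--     gaze_history.append(current_gaze)
--     if len(gaze_history) > max_duration:
--         gaze_history.pop(0)
--
--     # Forward single pass: reset on any non-away frame, so the counter
--     # ends holding the trailing consecutive away run.
--     away_count = 0
--     for gaze in gaze_history:
--         away_count = away_count + 1 if gaze in ["Left", "Right"] else 0
--
--     return away_count, len(gaze_history)
-- ===== Notes on version B (the rewrite author's own statement) =====
-- stated objective: alternative
-- what changed: Replaces the reversed iteration with early break by a forward single pass that resets the counter on every non-away frame, leaving the trailing run length in the accumulator.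
import Mathlib
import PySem

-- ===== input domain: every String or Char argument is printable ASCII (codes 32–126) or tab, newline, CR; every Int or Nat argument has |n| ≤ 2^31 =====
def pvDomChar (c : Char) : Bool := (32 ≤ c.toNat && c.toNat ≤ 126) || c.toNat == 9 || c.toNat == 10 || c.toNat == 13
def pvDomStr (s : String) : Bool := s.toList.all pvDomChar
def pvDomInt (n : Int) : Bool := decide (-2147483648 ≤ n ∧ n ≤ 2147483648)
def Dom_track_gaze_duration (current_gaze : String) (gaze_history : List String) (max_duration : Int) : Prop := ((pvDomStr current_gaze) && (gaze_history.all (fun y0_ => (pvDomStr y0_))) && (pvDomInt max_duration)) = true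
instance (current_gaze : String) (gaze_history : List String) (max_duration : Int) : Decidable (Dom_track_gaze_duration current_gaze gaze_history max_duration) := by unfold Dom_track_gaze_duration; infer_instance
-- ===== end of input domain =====

-- B replaces A's reversed-with-break counting by a forward pass that resets the counter;
-- equivalence is about the RETURN value (both Pythons mutate gaze_history identically).

-- ===== PORT A =====
-- A's reversed loop with break: count while gaze is away, stop at the first other frame.
def awayCountRev : List String → Int
  | [] => 0
  | g :: rest => if g == "Left" || g == "Right" then awayCountRev rest + 1 else 0

def track_gaze_duration (current_gaze : String) (gaze_history : List String) (max_duration : Int) : Int × Int :=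
  let h0 := gaze_history ++ [current_gaze]
  let h := if (h0.length : Int) > max_duration then h0.drop 1 else h0
  (awayCountRev h.reverse, (h.length : Int))

-- ===== PORT B =====
def track_gaze_duration_alt (current_gaze : String) (gaze_history : List String) (max_duration : Int) : Int × Int :=
  let h0 := gaze_history ++ [current_gaze]
  let h := if (h0.length : Int) > max_duration then h0.drop 1 else h0
  (h.foldl (fun a g => if g == "Left" || g == "Right" then a + 1 else 0) 0, (h.length : Int))

-- ===== PRECONDITION & SPEC =====
def Spec_track_gaze_duration (current_gaze : String) (gaze_history : List String) (max_duration : Int) (out : Int × Int) : Prop := out = track_gaze_duration_alt current_gaze gaze_history max_duration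
instance (current_gaze : String) (gaze_history : List String) (max_duration : Int) (out : Int × Int) : Decidable (Spec_track_gaze_duration current_gaze gaze_history max_duration out) := by unfold Spec_track_gaze_duration; infer_instance

-- ===== CLAIM (what is proved, stated in full; the proofs are below) =====
def Claim_equal_track_gaze_duration : Prop := ∀ (current_gaze : String) (gaze_history : List String) (max_duration : Int), Dom_track_gaze_duration current_gaze gaze_history max_duration → Spec_track_gaze_duration current_gaze gaze_history max_duration (track_gaze_duration current_gaze gaze_history max_duration)

-- ===== LEMMAS AND PROOFS =====
theorem foldl_reset_eq_awayCountRev (l : List String) :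
    l.foldl (fun a g => if g == "Left" || g == "Right" then a + 1 else 0) 0 = awayCountRev l.reverse := by
  induction l using List.reverseRecOn with
  | nil => rfl
  | append_singleton ys x ih =>
    rw [List.foldl_append, List.reverse_append]
    simp only [List.foldl_cons, List.foldl_nil, List.reverse_cons, List.reverse_nil,
      List.nil_append, List.singleton_append, awayCountRev]
    rw [ih]

-- ===== VERDICT (by name: the statement is the Claim_ definition above) =====
theorem track_gaze_duration_spec : Claim_equal_track_gaze_duration := by
  intro cg h md _
  unfold Spec_track_gaze_duration track_gaze_duration track_gaze_duration_alt
  simp only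
  rw [foldl_reset_eq_awayCountRev]
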